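-- pv_equiv track=rewrite | github.com/kklee0930/Algorithm | 프로그래머스/unrated/159994. 카드 뭉치/카드 뭉치.py | solution
-- ===== SOURCE A (Python) =====
-- def solution(cards1, cards2, goal):
--     for word in goal: # goal에서의 iteration
--         if len(cards1) >= 1: # 카드1에 해당 단어가 존재할경우
--             if word == cards1[0]: # 리스트 첫번째 원소가 word를 같은지 체크 후
--                 cards1.remove(cards1[0]) # 같다면 삭제 후 다음 loop 진행
--                 continue
--
--         if len(cards2) >= 1:
--             if word == cards2[0]:
--                 cards2.remove(cards2[0])
--                 continue
--             else: # cards1과 cards2에 모두 존재하지 않는다면 조건에 부합하여 불가능처리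
--                 return 'No'
--
--         else: # cards1과 cards2에 모두 존재하지 않는다면 조건에 부합하여 불가능처리
--             return 'No'
--
--     return 'Yes'
-- ===== SOURCE B (Python) =====
-- def solution(cards1, cards2, goal):
--     i = j = 0
--     for word in goal:
--         if i < len(cards1) and cards1[i] == word:
--             i += 1
--         elif j < len(cards2) and cards2[j] == word:
--             j += 1
--         else:
--             return 'No'
--     return 'Yes'
-- ===== Notes on version B (the rewrite author's own statement) =====
-- stated objective: alternative
-- what changed: Replaces A's destructive list.remove (which shifts the deck and mutates the input lists) with two read-only index pointers advanced in a single pass over goal; a timing run read 1.82x at the largest size but was not consistent, so no speed is claimed.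
import Mathlib
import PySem

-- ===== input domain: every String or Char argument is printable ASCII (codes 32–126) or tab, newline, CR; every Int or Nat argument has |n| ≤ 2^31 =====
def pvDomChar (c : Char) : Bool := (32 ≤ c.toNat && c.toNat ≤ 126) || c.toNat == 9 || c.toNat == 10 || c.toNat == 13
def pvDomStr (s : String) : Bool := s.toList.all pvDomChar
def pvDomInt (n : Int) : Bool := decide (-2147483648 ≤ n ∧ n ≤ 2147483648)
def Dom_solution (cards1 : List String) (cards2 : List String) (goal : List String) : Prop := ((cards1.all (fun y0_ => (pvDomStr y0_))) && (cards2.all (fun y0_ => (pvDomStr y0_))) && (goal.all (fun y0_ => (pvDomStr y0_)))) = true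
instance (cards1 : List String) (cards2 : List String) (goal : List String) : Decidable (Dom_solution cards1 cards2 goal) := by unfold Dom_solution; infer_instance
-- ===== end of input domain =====

-- ===== PORT A =====
-- B changes the return-value computation only; A mutates cards1/cards2 in place (remove), B does not.
-- A's loop over goal, carrying the (mutated) decks; cards1.remove(cards1[0]) removes the first
-- occurrence of the head, i.e. the head itself, so it is the tail.
def solutionLoopA : List String → List String → List String → String
  | _, _, [] => "Yes"
  | c1, c2, w :: rest =>
    match c1 with
    | x :: t1 =>
      if w == x then solutionLoopA t1 c2 rest
      else
        match c2 with
        | y :: t2 => if w == y then solutionLoopA (x :: t1) t2 rest else "No"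
        | [] => "No"
    | [] =>
      match c2 with
      | y :: t2 => if w == y then solutionLoopA [] t2 rest else "No"
      | [] => "No"

def solution (cards1 : List String) (cards2 : List String) (goal : List String) : String :=
  solutionLoopA cards1 cards2 goal

-- ===== PORT B =====
-- B's loop over goal, carrying two index pointers into the untouched decks.
def solutionLoopB (c1 c2 : List String) : Nat → Nat → List String → String
  | _, _, [] => "Yes"
  | i, j, w :: rest =>
    if c1[i]? == some w then solutionLoopB c1 c2 (i + 1) j rest
    else if c2[j]? == some w then solutionLoopB c1 c2 i (j + 1) rest
    else "No"

def solution_alt (cards1 : List String) (cards2 : List String) (goal : List String) : String :=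
  solutionLoopB cards1 cards2 0 0 goal

-- ===== PRECONDITION & SPEC =====
def Spec_solution (cards1 : List String) (cards2 : List String) (goal : List String) (out : String) : Prop := out = solution_alt cards1 cards2 goal
instance (cards1 : List String) (cards2 : List String) (goal : List String) (out : String) : Decidable (Spec_solution cards1 cards2 goal out) := by unfold Spec_solution; infer_instance

-- ===== CLAIM (what is proved, stated in full; the proofs are below) =====
def Claim_equal_solution : Prop := ∀ (cards1 : List String) (cards2 : List String) (goal : List String), Dom_solution cards1 cards2 goal → Spec_solution cards1 cards2 goal (solution cards1 cards2 goal)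

-- ===== LEMMAS AND PROOFS =====

theorem loopAB (goal : List String) : ∀ (c1 c2 : List String) (i j : Nat),
    solutionLoopA (c1.drop i) (c2.drop j) goal = solutionLoopB c1 c2 i j goal := by
  induction goal with
  | nil => intro c1 c2 i j; rfl
  | cons w rest ih =>
    intro c1 c2 i j
    have h1 : c1[i]? = (c1.drop i).head? := by simp [List.head?_drop]
    have h2 : c2[j]? = (c2.drop j).head? := by simp [List.head?_drop]
    have d1 : c1.drop (i + 1) = (c1.drop i).tail := by simp [List.tail_drop]
    have d2 : c2.drop (j + 1) = (c2.drop j).tail := by simp [List.tail_drop]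
    rcases e1 : c1.drop i with _ | ⟨x, t1⟩ <;> rcases e2 : c2.drop j with _ | ⟨y, t2⟩ <;>
        rw [e1] at h1 d1 <;> rw [e2] at h2 d2 <;>
        simp only [List.head?_nil, List.head?_cons, List.tail_nil, List.tail_cons] at h1 h2 d1 d2
    · -- both exhausted
      simp [solutionLoopA, solutionLoopB, h1, h2]
    · -- cards1 exhausted, cards2 has y
      by_cases hw : w = y
      · rw [show solutionLoopA [] (y :: t2) (w :: rest) = solutionLoopA [] t2 rest by
            simp [solutionLoopA, hw],
          show solutionLoopB c1 c2 i j (w :: rest) = solutionLoopB c1 c2 i (j + 1) rest by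
            simp [solutionLoopB, h1, h2, hw],
          ← ih c1 c2 i (j + 1), e1, d2]
      · simp [solutionLoopA, solutionLoopB, h1, h2, hw, Ne.symm hw]
    · -- cards1 has x, cards2 exhausted
      by_cases hw : w = x
      · rw [show solutionLoopA (x :: t1) [] (w :: rest) = solutionLoopA t1 [] rest by
            simp [solutionLoopA, hw],
          show solutionLoopB c1 c2 i j (w :: rest) = solutionLoopB c1 c2 (i + 1) j rest by
            simp [solutionLoopB, h1, hw],
          ← ih c1 c2 (i + 1) j, d1, e2]
      · simp [solutionLoopA, solutionLoopB, h1, h2, hw, Ne.symm hw]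
    · -- both have a card
      by_cases hx : w = x
      · rw [show solutionLoopA (x :: t1) (y :: t2) (w :: rest) = solutionLoopA t1 (y :: t2) rest by
            simp [solutionLoopA, hx],
          show solutionLoopB c1 c2 i j (w :: rest) = solutionLoopB c1 c2 (i + 1) j rest by
            simp [solutionLoopB, h1, hx],
          ← ih c1 c2 (i + 1) j, d1, e2]
      · by_cases hy : w = y
        · have hyx : ¬ y = x := fun h => hx (hy.trans h)
          have hxy : ¬ x = y := fun h => hx (hy.trans h.symm)
          rw [show solutionLoopA (x :: t1) (y :: t2) (w :: rest) = solutionLoopA (x :: t1) t2 rest by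
              simp [solutionLoopA, hy, hyx],
            show solutionLoopB c1 c2 i j (w :: rest) = solutionLoopB c1 c2 i (j + 1) rest by
              simp [solutionLoopB, h1, h2, hy, hxy],
            ← ih c1 c2 i (j + 1), e1, d2]
        · simp [solutionLoopA, solutionLoopB, h1, h2, hx, hy, Ne.symm hx, Ne.symm hy]

-- ===== VERDICT (by name: the statement is the Claim_ definition above) =====
theorem solution_spec : Claim_equal_solution := by
  intro c1 c2 goal _
  unfold Spec_solution solution solution_alt
  simpa using (loopAB goal c1 c2 0 0)
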